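-- pv_equiv track=rewrite | github.com/almala333/EEBE-problemas-Jutge-Q1-24-25 | 06_Listas de listas/X87295_Matriu permutació.py | matriu_permutacio
-- ===== SOURCE A (Python) =====
-- def matriu_permutacio(mat):
--     '''
--     Parametres
--     ----------
--     mat: List
--         Matriu que representa una permutació. Ha de ser una matriu quadrada on cada fila i cada columna conté exactament un element igual a 1 i la resta 0.
--
--     Retorna
--     -------
--     bool
--         Retorna True si la matriu és una matriu de permutació, és a dir, si cada fila i cada columna conté exactament un 1 i la resta 0. Retorna False en cas contrari.
--
--     Tests públics
--     -------------
--     >>> matriu_permutacio([[0, 0, 1], [1, 0, 0], [0, 1, 0]])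
--     True
--     >>> matriu_permutacio([[0, 1, 0], [0, 0, 1], [1, 0, 0]])
--     True
--     >>> matriu_permutacio([[0, 0, 1], [1, 0, 0], [0, 0, 1]])
--     False
--     >>> matriu_permutacio([[0, 1], [1, 0]])
--     True
--
--     Tests privats
--     -------------
--     >>> matriu_permutacio([[1, 0], [0, 1]])
--     True
--     >>> matriu_permutacio([[1, 1], [0, 0]])
--     False
--     >>> matriu_permutacio([[0, 0, 0], [0, 0, 0], [0, 0, 0]])
--     False
--     >>> matriu_permutacio([[1]])
--     True
--     >>> matriu_permutacio([[0, 1], [1, 1]])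
--     False
--     '''
--     for row in mat:
--         if len(row) != len(mat):
--             return False
--     for i in range(len(mat)):
--         if sum(mat[i]) != 1:
--             return False
--         column_sum = 0
--         for j in range(len(mat)):
--             column_sum += mat[j][i]
--         if column_sum != 1:
--             return False
--
--     return True
-- ===== SOURCE B (Python) =====
-- def matriu_permutacio(mat):
--     n = len(mat)
--     for row in mat:
--         if len(row) != n:
--             return False
--     col_sums = [0] * n
--     rows_ok = True
--     for row in mat:
--         if sum(row) != 1:
--             rows_ok = False
--         for j, x in enumerate(row):
--             col_sums[j] += x
--     return rows_ok and all(c == 1 for c in col_sums)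
-- ===== Notes on version B (the rewrite author's own statement) =====
-- stated objective: alternative
-- what changed: Replaces A's per-column rescans (for each i, an inner loop re-reading column i) with one pass over the rows that accumulates all column sums in a table, checking row sums in the same pass; it trades A's early exits for a single full sweep.
import Mathlib
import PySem

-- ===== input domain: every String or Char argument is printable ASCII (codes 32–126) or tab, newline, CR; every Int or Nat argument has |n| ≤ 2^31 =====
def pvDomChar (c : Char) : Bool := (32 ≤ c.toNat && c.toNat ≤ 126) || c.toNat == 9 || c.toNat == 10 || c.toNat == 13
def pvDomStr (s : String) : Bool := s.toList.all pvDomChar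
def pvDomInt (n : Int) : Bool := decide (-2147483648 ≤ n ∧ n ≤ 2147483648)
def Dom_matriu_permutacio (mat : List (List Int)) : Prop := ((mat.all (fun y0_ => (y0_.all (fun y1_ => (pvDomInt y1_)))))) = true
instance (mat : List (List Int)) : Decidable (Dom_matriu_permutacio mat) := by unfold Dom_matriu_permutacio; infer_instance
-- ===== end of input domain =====

-- B replaces A's per-column rescans with one pass over the rows that accumulates a column-sum table.

-- ===== PORT A =====
-- for row in mat: if len(row) != len(mat): return False  — early-return loop = all rows pass
-- then for i in range(len(mat)): row-sum check, then inner loop summing column i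
def matriu_permutacio (mat : List (List Int)) : Bool :=
  if mat.all (fun row => (row.length : Int) == (mat.length : Int)) then
    (PySem.List.pyRange 0 (mat.length : Int) 1).all (fun i =>
      if (PySem.List.pyGetD mat i []).sum ≠ 1 then false
      else
        -- column_sum accumulation; pyGetD is exact here: indices are in range after the square check
        decide ((PySem.List.pyRange 0 (mat.length : Int) 1).foldl
          (fun acc j => acc + PySem.List.pyGetD (PySem.List.pyGetD mat j []) i 0) 0 = 1))
  else false

-- ===== PORT B =====
-- square check, then ONE fold over the rows carrying (rows_ok, col_sums);
-- the 'for j, x in enumerate(row): col_sums[j] += x' loop is the elementwise add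
-- List.zipWith (·+·), exact here because every row has length len(mat) = len(col_sums)
def matriu_permutacio_alt (mat : List (List Int)) : Bool :=
  if mat.all (fun row => (row.length : Int) == (mat.length : Int)) then
    let st := mat.foldl
      (fun (st : Bool × List Int) row =>
        (st.1 && (row.sum == 1), List.zipWith (· + ·) st.2 row))
      (true, List.replicate mat.length 0)
    st.1 && st.2.all (fun c => c == 1)
  else false

-- ===== PRECONDITION & SPEC =====
def Spec_matriu_permutacio (mat : List (List Int)) (out : Bool) : Prop := out = matriu_permutacio_alt mat
instance (mat : List (List Int)) (out : Bool) : Decidable (Spec_matriu_permutacio mat out) := by unfold Spec_matriu_permutacio; infer_instance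

-- ===== CLAIM (what is proved, stated in full; the proofs are below) =====
def Claim_equal_matriu_permutacio : Prop := ∀ (mat : List (List Int)), Dom_matriu_permutacio mat → Spec_matriu_permutacio mat (matriu_permutacio mat)

-- ===== LEMMAS AND PROOFS =====

-- B's boolean accumulator is the 'all' of the row-sum checks
lemma foldl_and_eq_all (l : List (List Int)) (p : List Int → Bool) :
    ∀ b : Bool, l.foldl (fun b row => b && p row) b = (b && l.all p) := by
  induction l with
  | nil => simp
  | cons r t ih => intro b; simp [List.foldl_cons, ih, Bool.and_assoc]

-- length of the column-sum table is preserved by the fold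
lemma cols_length (l : List (List Int)) :
    ∀ c : List Int, (∀ row ∈ l, row.length = c.length) →
      (l.foldl (fun c row => List.zipWith (· + ·) c row) c).length = c.length := by
  induction l with
  | nil => intro c _; simp
  | cons r t ih =>
    intro c h
    have hr : r.length = c.length := h r (by simp)
    have hz : (List.zipWith (· + ·) c r).length = c.length := by simp [hr]
    rw [List.foldl_cons, ih _ (by intro row hm; rw [hz]; exact h row (by simp [hm])), hz]

-- each entry of the final column-sum table is the column sum
lemma cols_getD (l : List (List Int)) :
    ∀ c : List Int, (∀ row ∈ l, row.length = c.length) → ∀ k, k < c.length →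
      (l.foldl (fun c row => List.zipWith (· + ·) c row) c).getD k 0 =
        c.getD k 0 + (l.map (fun row => PySem.List.pyGetD row (k : Int) 0)).sum := by
  induction l with
  | nil => intro c _ k hk; simp
  | cons r t ih =>
    intro c h k hk
    have hr : r.length = c.length := h r (by simp)
    have hz : (List.zipWith (· + ·) c r).length = c.length := by simp [hr]
    rw [List.foldl_cons, ih _ (by intro row hm; rw [hz]; exact h row (by simp [hm])) k (by omega)]
    have h1 : (List.zipWith (· + ·) c r).getD k 0 = c.getD k 0 + r.getD k 0 := by
      rw [List.getD_eq_getElem _ _ (by omega), List.getD_eq_getElem _ _ (by omega),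
        List.getD_eq_getElem _ _ (by omega), List.getElem_zipWith]
    have h2 : PySem.List.pyGetD r (k : Int) 0 = r.getD k 0 := PySem.List.pyGetD_natCast r k 0
    rw [List.map_cons, List.sum_cons, h1, h2]
    ring

theorem matriu_permutacio_eq (mat : List (List Int)) :
    matriu_permutacio mat = matriu_permutacio_alt mat := by
  unfold matriu_permutacio matriu_permutacio_alt
  by_cases hsq : mat.all (fun row => (row.length : Int) == (mat.length : Int)) = true
  · rw [if_pos hsq, if_pos hsq]
    have hlen : ∀ row ∈ mat, row.length = mat.length := by
      intro row hm
      have := (List.all_eq_true.mp hsq) row hm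
      exact_mod_cast of_decide_eq_true this
    have hlen' : ∀ row ∈ mat, row.length = (List.replicate mat.length (0 : Int)).length := by
      simpa using hlen
    simp only []
    rw [PySem.List.foldl_prod_mk (fun b (row : List Int) => b && (row.sum == 1))
      (fun c row => List.zipWith (· + ·) c row)]
    rw [foldl_and_eq_all, Bool.true_and]
    set cols := mat.foldl (fun c row => List.zipWith (· + ·) c row)
      (List.replicate mat.length (0 : Int)) with hcols
    have hclen : cols.length = mat.length := by
      rw [hcols, cols_length mat _ hlen']; simp
    have hcget : ∀ k, k < mat.length →
        cols.getD k 0 = (mat.map (fun row => PySem.List.pyGetD row (k : Int) 0)).sum := by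
      intro k hk
      rw [hcols, cols_getD mat _ hlen' k (by simpa using hk)]
      simp
    -- reduce A's column foldl to the map-sum
    have hcol : ∀ i : Int,
        (PySem.List.pyRange 0 (mat.length : Int) 1).foldl
          (fun acc j => acc + PySem.List.pyGetD (PySem.List.pyGetD mat j []) i 0) 0 =
        (mat.map (fun row => PySem.List.pyGetD row i 0)).sum := by
      intro i
      rw [PySem.List.foldl_pyRange_zero_pyGetD' mat []
        (fun acc row => acc + PySem.List.pyGetD row i 0) 0, PySem.List.foldl_add]
      simp
    rw [Bool.eq_iff_iff]
    simp only [List.all_eq_true, PySem.List.mem_pyRange_one, Bool.and_eq_true]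
    constructor
    · intro h
      constructor
      · intro row hm
        obtain ⟨k, hk, rfl⟩ := List.mem_iff_getElem.mp hm
        have h2 := h (k : Int) ⟨by positivity, by exact_mod_cast hk⟩
        rw [PySem.List.pyGetD_natCast, List.getD_eq_getElem _ _ hk] at h2
        by_cases hs : mat[k].sum = 1
        · simp [hs]
        · rw [if_pos hs] at h2
          exact absurd h2 (by simp)
      · intro c hm
        obtain ⟨k, hk, rfl⟩ := List.mem_iff_getElem.mp hm
        have hk' : k < mat.length := by omega
        have h2 := h (k : Int) ⟨by positivity, by exact_mod_cast hk'⟩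
        by_cases hs : (PySem.List.pyGetD mat (k : Int) []).sum = 1
        · rw [if_neg (not_not_intro hs), hcol] at h2
          have h3 := of_decide_eq_true h2
          rw [← List.getD_eq_getElem _ _ hk, hcget k hk', h3]
          simp
        · rw [if_pos hs] at h2
          exact absurd h2 (by simp)
    · rintro ⟨hrows, hcall⟩ i ⟨hi0, hin⟩
      have hk' : i.toNat < mat.length := by omega
      have hrow : PySem.List.pyGetD mat i [] = mat[i.toNat] :=
        PySem.List.pyGetD_eq_getElem mat [] hi0 hin
      have hi : i = (i.toNat : Int) := by omega
      have hrs : mat[i.toNat].sum = 1 := by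
        have := hrows mat[i.toNat] (List.getElem_mem hk')
        simpa using this
      rw [hrow, if_neg (by simp [hrs])]
      rw [hcol]
      have := hcall (cols.getD i.toNat 0) (by
        rw [List.getD_eq_getElem _ _ (by omega)]
        exact List.getElem_mem (by omega))
      have heq : cols.getD i.toNat 0 = 1 := by simpa using this
      rw [hcget i.toNat hk'] at heq
      rw [hi, heq]
      simp
  · rw [if_neg hsq, if_neg hsq]

-- ===== VERDICT (by name: the statement is the Claim_ definition above) =====
theorem matriu_permutacio_spec : Claim_equal_matriu_permutacio := by
  intro mat _
  unfold Spec_matriu_permutacio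
  exact matriu_permutacio_eq mat
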